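-- pv_equiv track=rewrite | github.com/HaeYeon-Won/I-Studied | CodingStudy/삼성기출풀어보기/[15685]드래곤커브.py | solution
-- ===== SOURCE A (Python) =====
-- from collections import deque
--
-- def check(mtrx):
--     result = 0
--     for i in range(199):
--         for j in range(199):
--             if mtrx[i][j]==1:
--                 if mtrx[i+1][j] and mtrx[i][j+1] and mtrx[i+1][j+1]: #파이썬에서 0이아닌수는 다 True
--                     result+=1
--     return result
--
-- def rotate90(q):
--     point = q[-1] #회전 시키는 기준점
--     for i in range(len(q)-2,-1,-1): #중심점을 기준으로 가까운 점부터 회전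
--         #(a,b)를 기준으로 x,y를 회전 시키는 공식
--         #sin90 = 1, cos90 = 0
--
--         #반시계 방향 회전 변환
--         #x' = (x-a) * cosR - (y-b)sinR
--         #y' = (x-a) * sinR + (y-b)cosR
--
--         #시계 방향 회전 변환
--         # x' = a + ( (x-a) * cosR + (y-b) * sinR )
--         # y' = b + ( -(x-a) * sinR + (y-b) * cosR )
--         #ex . (3,3), (3,4)에서 (3,4) 중심 회전 => 위 식에 따라 시계방향으로 90도 회전 시키면 (2,4)가 된다.
--         rotate_row, rotate_col = point[0]+(q[i][1]-point[1]), point[1]-(q[i][0]-point[0])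
--         q.append((rotate_row, rotate_col))
--     return q
--
-- def DragonCurve(q, mtrx, generation):
--     for i in range(generation):
--         q = rotate90(q)
--     while q: #
--         row,col = q.popleft()
--         mtrx[row][col]=1
--     return mtrx
--
-- def solution(n, data):
--     #x축 = col, y축 = row
--     #0: x좌표가증가하는방향(→)
--     #1: y좌표가감소하는방향(↑)
--     #2: x좌표가감소하는방향(←)
--     #3: y좌표가증가하는방향(↓)
--     direction = ((0,1),(-1,0),(0,-1),(1,0))
--     mtrx = [[0 for _ in range(200)] for _ in range(200)] #점을 확장 시키면 하나의 grid로 볼 수 있음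
--     for i in data:
--         q=deque()
--         start_row, start_col, d, g = i[1], i[0], i[2], i[3] #x축 = col, y축 = row
--         next_row, next_col = start_row+direction[d][0], start_col+direction[d][1] #여기까지 0세대
--         q.append((start_row, start_col))
--         q.append((next_row, next_col))
--         mtrx = DragonCurve(q, mtrx, g)
--
--     return check(mtrx)
-- ===== SOURCE B (Python) =====
-- def solution(n, data):
--     # Builds each curve as a list of unit moves (doubling with a 90° rotation of the
--     # reversed move list) and walks it on the grid, instead of rotating a point list.
--     dirs = ((0, 1), (-1, 0), (0, -1), (1, 0))
--     grid = [[0] * 200 for _ in range(200)]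
--     for item in data:
--         start_col, start_row, d, g = item[0], item[1], item[2], item[3]
--         moves = [dirs[d]]
--         for _ in range(g):
--             moves += [(-dc, dr) for dr, dc in reversed(moves)]
--         r, c = start_row, start_col
--         grid[r][c] = 1
--         for dr, dc in moves:
--             r += dr
--             c += dc
--             grid[r][c] = 1
--     result = 0
--     for i in range(199):
--         row, nxt = grid[i], grid[i + 1]
--         for j in range(199):
--             if row[j] == 1 and row[j + 1] == 1 and nxt[j] == 1 and nxt[j + 1] == 1:
--                 result += 1
--     return result
-- ===== Notes on version B (the rewrite author's own statement) =====
-- stated objective: alternative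
-- what changed: B represents each dragon curve as a list of unit moves doubled per generation by rotating the reversed move list 90 degrees clockwise and walks it cell by cell, instead of A's doubling of an explicit point list by rotating coordinates about the last point and replaying a deque; Pre_ excludes only the inputs on which A raises (a row shorter than 4, a direction index outside -4..3, or a curve cell outside Python-legal grid indices).
import Mathlib
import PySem

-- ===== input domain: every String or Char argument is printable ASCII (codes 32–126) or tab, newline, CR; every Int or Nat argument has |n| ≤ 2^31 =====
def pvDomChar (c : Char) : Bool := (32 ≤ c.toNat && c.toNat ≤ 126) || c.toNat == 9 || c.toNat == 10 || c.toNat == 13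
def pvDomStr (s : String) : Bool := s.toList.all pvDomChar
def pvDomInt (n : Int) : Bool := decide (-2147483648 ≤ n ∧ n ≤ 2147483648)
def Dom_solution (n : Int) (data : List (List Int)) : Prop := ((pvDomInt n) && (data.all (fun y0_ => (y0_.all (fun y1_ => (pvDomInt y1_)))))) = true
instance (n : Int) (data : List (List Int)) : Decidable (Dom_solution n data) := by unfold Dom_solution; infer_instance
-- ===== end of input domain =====

-- B builds each curve as a unit-move sequence (doubled by rotating the reversed move list)
-- and walks it, instead of A's doubling of a point list by rotating coordinates about the
-- last point; same grid, same 2x2 count (alternative decomposition, not claimed faster).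

-- ===== PORT A =====
-- direction = ((0,1),(-1,0),(0,-1),(1,0))
def pvDirs : List (Int × Int) := [(0, 1), (-1, 0), (0, -1), (1, 0)]

-- mtrx[row][col] = 1   (Python list assignment, negative indices wrap: pySetD/pyGetD)
def pvMark (m : List (List Int)) (rc : Int × Int) : List (List Int) :=
  PySem.List.pySetD m rc.1 (PySem.List.pySetD (PySem.List.pyGetD m rc.1 []) rc.2 1)

-- rotate90: pivot q[-1]; for i in range(len(q)-2,-1,-1) append the point q[i] rotated
-- 90° clockwise about the pivot (appends never land at an index the loop reads)
def rotate90 (q : List (Int × Int)) : List (Int × Int) :=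
  let point := PySem.List.pyGetD q (-1) (0, 0)
  q ++ (PySem.List.pyRange ((q.length : Int) - 2) (-1) (-1)).map
    (fun i =>
      let qi := PySem.List.pyGetD q i (0, 0)
      (point.1 + (qi.2 - point.2), point.2 - (qi.1 - point.1)))

-- DragonCurve: rotate the point list `generation` times, then mark every point
def DragonCurve (q : List (Int × Int)) (mtrx : List (List Int)) (generation : Int) :
    List (List Int) :=
  let q' := (PySem.List.pyRange 0 generation 1).foldl (fun acc _ => rotate90 acc) q
  q'.foldl pvMark mtrx

-- check: count i,j with mtrx[i][j]==1 and the three neighbours truthy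
def check (mtrx : List (List Int)) : Int :=
  (PySem.List.pyRange 0 199 1).foldl (fun res i =>
    (PySem.List.pyRange 0 199 1).foldl (fun res j =>
      if PySem.List.pyGetD (PySem.List.pyGetD mtrx i []) j 0 = 1 then
        if PySem.List.pyGetD (PySem.List.pyGetD mtrx (i + 1) []) j 0 ≠ 0 ∧
            PySem.List.pyGetD (PySem.List.pyGetD mtrx i []) (j + 1) 0 ≠ 0 ∧
            PySem.List.pyGetD (PySem.List.pyGetD mtrx (i + 1) []) (j + 1) 0 ≠ 0 then
          res + 1
        else res
      else res) res) 0

def solution (n : Int) (data : List (List Int)) : Int :=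
  let mtrx := List.replicate 200 (List.replicate 200 (0 : Int))
  let mtrx := data.foldl (fun m i =>
    let start_row := PySem.List.pyGetD i 1 0
    let start_col := PySem.List.pyGetD i 0 0
    let d := PySem.List.pyGetD i 2 0
    let g := PySem.List.pyGetD i 3 0
    let dir := PySem.List.pyGetD pvDirs d (0, 0)
    let q := [(start_row, start_col), (start_row + dir.1, start_col + dir.2)]
    DragonCurve q m g) mtrx
  check mtrx

-- ===== PORT B =====
-- rotate a unit move 90° clockwise (in row/col coordinates): (dr,dc) -> (-dc,dr)
def pvRotMv (mv : Int × Int) : Int × Int := (-mv.2, mv.1)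

-- moves += [(-dc,dr) for dr,dc in reversed(moves)]
def pvGrow (ms : List (Int × Int)) : List (Int × Int) := ms ++ ms.reverse.map pvRotMv

def solution_alt (n : Int) (data : List (List Int)) : Int :=
  let grid := List.replicate 200 (List.replicate 200 (0 : Int))
  let grid := data.foldl (fun gr item =>
    let start_col := PySem.List.pyGetD item 0 0
    let start_row := PySem.List.pyGetD item 1 0
    let d := PySem.List.pyGetD item 2 0
    let g := PySem.List.pyGetD item 3 0
    let moves := (PySem.List.pyRange 0 g 1).foldl (fun ms _ => pvGrow ms)
      [PySem.List.pyGetD pvDirs d (0, 0)]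
    -- r,c = start; mark it; then walk: move, mark, move, mark …
    (moves.foldl
      (fun st mv =>
        let p := (st.1.1 + mv.1, st.1.2 + mv.2)
        (p, pvMark st.2 p))
      ((start_row, start_col), pvMark gr (start_row, start_col))).2) grid
  (PySem.List.pyRange 0 199 1).foldl (fun res i =>
    let row := PySem.List.pyGetD grid i []
    let nxt := PySem.List.pyGetD grid (i + 1) []
    (PySem.List.pyRange 0 199 1).foldl (fun res j =>
      if PySem.List.pyGetD row j 0 = 1 ∧ PySem.List.pyGetD row (j + 1) 0 = 1 ∧
          PySem.List.pyGetD nxt j 0 = 1 ∧ PySem.List.pyGetD nxt (j + 1) 0 = 1 then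
        res + 1
      else res) res) 0

-- ===== PRECONDITION & SPEC =====
-- A raises IndexError exactly when a row is shorter than 4, the direction index is outside
-- -4..3 (tuple lookup), or some cell of the curve's path lies outside the Python-legal grid
-- indices [-200,199]; Pre_ states exactly that return domain. The cell condition is checked
-- without replaying either port's 2^g-point doubling: the curve's exact bounding box obeys a
-- six-integer per-generation recurrence (new half = 90°-clockwise image of the old cells
-- about the current endpoint), with early exit once the box no longer fits.
def pvFit (box : Int × Int × Int × Int) : Bool :=
  -200 ≤ box.1 && box.2.1 ≤ 199 && -200 ≤ box.2.2.1 && box.2.2.2 ≤ 199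

def pvFitsAux : Nat → (Int × Int) → (Int × Int) → (Int × Int × Int × Int) → Bool
  | 0, _, _, box => pvFit box
  | g + 1, s, e, (rmin, rmax, cmin, cmax) =>
    if pvFit (rmin, rmax, cmin, cmax) then
      pvFitsAux g s (e.1 + (s.2 - e.2), e.2 - (s.1 - e.1))
        (min rmin (e.1 - e.2 + cmin), max rmax (e.1 - e.2 + cmax),
         min cmin (e.1 + e.2 - rmax), max cmax (e.1 + e.2 - rmin))
    else false

def pvCurveFits (i : List Int) : Bool :=
  let sr := PySem.List.pyGetD i 1 0
  let sc := PySem.List.pyGetD i 0 0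
  let dir := PySem.List.pyGetD pvDirs (PySem.List.pyGetD i 2 0) (0, 0)
  let e := (sr + dir.1, sc + dir.2)
  pvFitsAux (PySem.List.pyGetD i 3 0).toNat (sr, sc) e
    (min sr e.1, max sr e.1, min sc e.2, max sc e.2)

def Pre_solution (n : Int) (data : List (List Int)) : Prop :=
  ∀ i ∈ data, 4 ≤ i.length ∧
    (-4 ≤ PySem.List.pyGetD i 2 0 ∧ PySem.List.pyGetD i 2 0 ≤ 3) ∧
    pvCurveFits i = true
instance (n : Int) (data : List (List Int)) : Decidable (Pre_solution n data) := by
  unfold Pre_solution; infer_instance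

def pvWitness_solution : Int × List (List Int) := (0, [[50, 60, 0, 2], [70, 40, 3, 3]])

def Spec_solution (n : Int) (data : List (List Int)) (out : Int) : Prop := out = solution_alt n data
instance (n : Int) (data : List (List Int)) (out : Int) : Decidable (Spec_solution n data out) := by unfold Spec_solution; infer_instance

-- ===== CLAIM (what is proved, stated in full; the proofs are below) =====
def Claim_equal_solution : Prop := ∀ (n : Int) (data : List (List Int)), Dom_solution n data → Pre_solution n data → Spec_solution n data (solution n data)

-- ===== LEMMAS AND PROOFS =====

-- the cells visited when walking moves `ms` from point `p` (start included), in order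
def pvPath (p : Int × Int) : List (Int × Int) → List (Int × Int)
  | [] => [p]
  | mv :: ms => p :: pvPath (p.1 + mv.1, p.2 + mv.2) ms

-- endpoint of the walk
def pvEnd (p : Int × Int) (ms : List (Int × Int)) : Int × Int :=
  ms.foldl (fun q mv => (q.1 + mv.1, q.2 + mv.2)) p

-- A's clockwise rotation of point x about pivot e
def pvRotPt (e x : Int × Int) : Int × Int := (e.1 + (x.2 - e.2), e.2 - (x.1 - e.1))

theorem pvPath_ne_nil (p : Int × Int) (ms : List (Int × Int)) : pvPath p ms ≠ [] := by
  cases ms <;> simp [pvPath]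

theorem pvPath_length (p : Int × Int) (ms : List (Int × Int)) :
    (pvPath p ms).length = ms.length + 1 := by
  induction ms generalizing p with
  | nil => simp [pvPath]
  | cons mv ms ih => simp [pvPath, ih]

theorem pvEnd_snoc (p : Int × Int) (ms : List (Int × Int)) (mv : Int × Int) :
    pvEnd p (ms ++ [mv]) = ((pvEnd p ms).1 + mv.1, (pvEnd p ms).2 + mv.2) := by
  simp [pvEnd]

theorem pvPath_append (p : Int × Int) (ms ks : List (Int × Int)) :
    pvPath p (ms ++ ks) = pvPath p ms ++ (pvPath (pvEnd p ms) ks).tail := by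
  induction ms generalizing p with
  | nil => cases ks <;> simp [pvPath, pvEnd]
  | cons mv ms ih => simp only [List.cons_append, pvPath, pvEnd, List.foldl_cons, ih]

theorem pvPath_snoc (p : Int × Int) (ms : List (Int × Int)) (mv : Int × Int) :
    pvPath p (ms ++ [mv]) = pvPath p ms ++ [pvEnd p (ms ++ [mv])] := by
  rw [pvPath_append, pvEnd_snoc]; rfl

theorem pvPath_getLast (p : Int × Int) (ms : List (Int × Int)) (h : pvPath p ms ≠ []) :
    (pvPath p ms).getLast h = pvEnd p ms := by
  induction ms generalizing p with
  | nil => simp [pvPath, pvEnd]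
  | cons mv ms ih =>
    simp only [pvPath, pvEnd, List.foldl_cons]
    rw [List.getLast_cons (pvPath_ne_nil _ ms)]
    exact ih _ _

theorem pvPath_dropLast (p : Int × Int) (ms : List (Int × Int)) :
    (pvPath p ms).dropLast ++ [pvEnd p ms] = pvPath p ms := by
  conv_rhs => rw [← List.dropLast_append_getLast (pvPath_ne_nil p ms)]
  rw [pvPath_getLast]

-- reversing a walk and rotating every cell clockwise about e is the walk of the
-- rotated, reversed moves starting from the rotated endpoint
theorem pvPath_reverse_rot (e : Int × Int) (ms : List (Int × Int)) (p : Int × Int) :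
    ((pvPath p ms).reverse).map (pvRotPt e) =
      pvPath (pvRotPt e (pvEnd p ms)) (ms.reverse.map pvRotMv) := by
  induction ms using List.reverseRecOn generalizing p with
  | nil => simp [pvPath, pvEnd]
  | append_singleton ms mv ih =>
    rw [pvPath_snoc, pvEnd_snoc]
    simp only [List.reverse_append, List.reverse_cons, List.reverse_nil, List.nil_append,
      List.map_cons, List.cons_append]
    rw [ih]
    show _ :: _ = pvPath _ (pvRotMv mv :: ms.reverse.map pvRotMv)
    rw [pvPath]
    have hpt : pvRotPt e (pvEnd p ms) =
        ((pvRotPt e ((pvEnd p ms).1 + mv.1, (pvEnd p ms).2 + mv.2)).1 + (pvRotMv mv).1,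
         (pvRotPt e ((pvEnd p ms).1 + mv.1, (pvEnd p ms).2 + mv.2)).2 + (pvRotMv mv).2) := by
      simp only [pvRotPt, pvRotMv, Prod.mk.injEq]
      constructor <;> ring
    rw [hpt]

theorem pvPath_head_tail (p : Int × Int) (ms : List (Int × Int)) :
    pvPath p ms = p :: (pvPath p ms).tail := by
  cases ms <;> simp [pvPath]

-- rotate90 acts on a walk by appending the clockwise-rotated reversed moves
theorem rotate90_path (p : Int × Int) (ms : List (Int × Int)) :
    rotate90 (pvPath p ms) = pvPath p (pvGrow ms) := by
  have hne := pvPath_ne_nil p ms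
  have hlast : PySem.List.pyGetD (pvPath p ms) (-1) ((0 : Int), (0 : Int)) = pvEnd p ms := by
    rw [PySem.List.pyGetD_neg_one (pvPath p ms) ((0 : Int), (0 : Int)) hne, pvPath_getLast]
  have hlen : ((pvPath p ms).length : Int) - 2 = (ms.length : Int) - 1 := by
    rw [pvPath_length]; push_cast; ring
  have hrange : PySem.List.pyRange ((ms.length : Int) - 1) (-1) (-1)
      = (PySem.List.pyRange 0 (ms.length : Int) 1).reverse := by
    rw [PySem.List.pyRange_neg_one_eq_reverse]; norm_num
  have hdl : ((pvPath p ms).dropLast).length = ms.length := by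
    rw [List.length_dropLast, pvPath_length]; simp
  have hmap : (PySem.List.pyRange 0 (ms.length : Int) 1).map
        (fun i => PySem.List.pyGetD (pvPath p ms) i ((0 : Int), (0 : Int)))
      = (pvPath p ms).dropLast := by
    have h1 : ∀ i ∈ PySem.List.pyRange 0 (ms.length : Int) 1,
        PySem.List.pyGetD (pvPath p ms) i ((0 : Int), (0 : Int))
          = PySem.List.pyGetD ((pvPath p ms).dropLast) i ((0 : Int), (0 : Int)) := by
      intro i hi
      rw [PySem.List.mem_pyRange_one] at hi
      have hi2 : i < ((pvPath p ms).length : Int) := by rw [pvPath_length]; push_cast; omega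
      rw [PySem.List.pyGetD_eq_getElem _ _ hi.1 hi2,
        PySem.List.pyGetD_eq_getElem _ _ hi.1 (by rw [hdl]; push_cast; omega),
        List.getElem_dropLast]
    rw [List.map_congr_left h1]
    have := PySem.List.map_pyGetD_pyRange_zero' ((pvPath p ms).dropLast) ((0 : Int), (0 : Int))
    rw [hdl] at this
    exact this
  have hrev : (pvPath p ms).reverse = pvEnd p ms :: ((pvPath p ms).dropLast).reverse := by
    conv_lhs => rw [← pvPath_dropLast p ms]
    simp
  have hkey := pvPath_reverse_rot (pvEnd p ms) ms p
  rw [hrev] at hkey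
  rw [pvPath_head_tail (pvRotPt (pvEnd p ms) (pvEnd p ms))] at hkey
  simp only [List.map_cons] at hkey
  have hee : pvRotPt (pvEnd p ms) (pvEnd p ms) = pvEnd p ms := by
    simp [pvRotPt]
  rw [hee] at hkey
  have htail := (List.cons_eq_cons.mp hkey).2
  show pvPath p ms ++ (PySem.List.pyRange (((pvPath p ms).length : Int) - 2) (-1) (-1)).map
      (fun i =>
        let qi := PySem.List.pyGetD (pvPath p ms) i ((0 : Int), (0 : Int))
        ((PySem.List.pyGetD (pvPath p ms) (-1) ((0 : Int), (0 : Int))).1 + (qi.2 - (PySem.List.pyGetD (pvPath p ms) (-1) ((0 : Int), (0 : Int))).2),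
         (PySem.List.pyGetD (pvPath p ms) (-1) ((0 : Int), (0 : Int))).2 - (qi.1 - (PySem.List.pyGetD (pvPath p ms) (-1) ((0 : Int), (0 : Int))).1)))
      = pvPath p (pvGrow ms)
  rw [hlast, hlen, hrange, List.map_reverse]
  have hmap2 : (PySem.List.pyRange 0 (ms.length : Int) 1).map
      (fun i =>
        let qi := PySem.List.pyGetD (pvPath p ms) i ((0 : Int), (0 : Int))
        ((pvEnd p ms).1 + (qi.2 - (pvEnd p ms).2), (pvEnd p ms).2 - (qi.1 - (pvEnd p ms).1)))
      = ((pvPath p ms).dropLast).map (pvRotPt (pvEnd p ms)) := by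
    rw [← hmap, List.map_map]; rfl
  rw [hmap2, ← List.map_reverse, htail, ← pvPath_append]
  rfl

-- rotating `g` times turns the 0-generation walk into the g-times-doubled move walk
theorem foldl_rotate90 (l : List Int) (p : Int × Int) (ms : List (Int × Int)) :
    l.foldl (fun q _ => rotate90 q) (pvPath p ms)
      = pvPath p (l.foldl (fun ms _ => pvGrow ms) ms) := by
  induction l generalizing ms with
  | nil => rfl
  | cons x l ih => simp only [List.foldl_cons, rotate90_path]; exact ih _

-- B's mark-as-you-walk fold marks exactly the cells of the walk, in order
theorem walk_mark (ms : List (Int × Int)) (p : Int × Int) (gr : List (List Int)) :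
    (ms.foldl
        (fun st mv =>
          let q := (st.1.1 + mv.1, st.1.2 + mv.2)
          (q, pvMark st.2 q))
        (p, pvMark gr p)).2
      = (pvPath p ms).foldl pvMark gr := by
  induction ms generalizing p gr with
  | nil => rfl
  | cons mv ms ih => simp only [List.foldl_cons, pvPath]; exact ih _ _

-- grid invariant: every cell is 0 or 1
def pv01 (g : List (List Int)) : Prop := ∀ r ∈ g, ∀ x ∈ r, x = 0 ∨ x = 1

theorem pyGetD_default_or_mem {α : Type} (xs : List α) (i : Int) (d : α) :
    PySem.List.pyGetD xs i d = d ∨ PySem.List.pyGetD xs i d ∈ xs := by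
  unfold PySem.List.pyGetD
  cases h : PySem.List.pyGet? xs i with
  | none => left; rfl
  | some x => right; simpa using PySem.List.mem_of_pyGet?_eq_some xs h

theorem mem_pySetD {α : Type} {xs : List α} {i : Int} {v a : α}
    (h : a ∈ PySem.List.pySetD xs i v) : a ∈ xs ∨ a = v := by
  unfold PySem.List.pySetD PySem.List.pySet? at h
  cases hk : PySem.List.pyIdx? xs.length i with
  | none => rw [hk] at h; simp at h; exact Or.inl h
  | some k =>
    rw [hk] at h; simp at h
    rcases List.mem_or_eq_of_mem_set h with h' | h'
    · exact Or.inl h'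
    · exact Or.inr h'

theorem pv01_cell {g : List (List Int)} (hg : pv01 g) (i j : Int) :
    PySem.List.pyGetD (PySem.List.pyGetD g i []) j 0 = 0 ∨
      PySem.List.pyGetD (PySem.List.pyGetD g i []) j 0 = 1 := by
  rcases pyGetD_default_or_mem g i [] with hr | hr
  · rw [hr]; rcases pyGetD_default_or_mem ([] : List Int) j 0 with hc | hc
    · exact Or.inl hc
    · simp at hc
  · rcases pyGetD_default_or_mem (PySem.List.pyGetD g i []) j 0 with hc | hc
    · exact Or.inl hc
    · exact hg _ hr _ hc

theorem pv01_mark {g : List (List Int)} (hg : pv01 g) (rc : Int × Int) :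
    pv01 (pvMark g rc) := by
  intro r hr x hx
  rcases mem_pySetD hr with hr' | hr'
  · exact hg _ hr' _ hx
  · subst hr'
    rcases mem_pySetD hx with hx' | hx'
    · rcases pyGetD_default_or_mem g rc.1 [] with h | h
      · rw [h] at hx'; simp at hx'
      · exact hg _ h _ hx'
    · exact Or.inr hx'

theorem pv01_foldl_mark {g : List (List Int)} (hg : pv01 g) (ps : List (Int × Int)) :
    pv01 (ps.foldl pvMark g) := by
  induction ps generalizing g with
  | nil => exact hg
  | cons q ps ih => exact ih (pv01_mark hg q)

theorem pv01_init : pv01 (List.replicate 200 (List.replicate 200 (0 : Int))) := by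
  intro r hr x hx
  rw [List.eq_of_mem_replicate hr] at hx
  exact Or.inl (List.eq_of_mem_replicate hx)

-- a fold with a step that preserves the 0/1 invariant preserves it
theorem pv01_foldl_step {β : Type} (f : List (List Int) → β → List (List Int))
    (h : ∀ m i, pv01 m → pv01 (f m i)) :
    ∀ (l : List β) (g0 : List (List Int)), pv01 g0 → pv01 (l.foldl f g0) := by
  intro l
  induction l with
  | nil => exact fun g0 hg => hg
  | cons x l ih => exact fun g0 hg => ih _ (h g0 x hg)

-- under the 0/1 invariant A's truthiness test agrees with B's ==1 test
theorem check_eq (g : List (List Int)) (hg : pv01 g) :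
    check g
      = (PySem.List.pyRange 0 199 1).foldl (fun res i =>
          let row := PySem.List.pyGetD g i []
          let nxt := PySem.List.pyGetD g (i + 1) []
          (PySem.List.pyRange 0 199 1).foldl (fun res j =>
            if PySem.List.pyGetD row j 0 = 1 ∧ PySem.List.pyGetD row (j + 1) 0 = 1 ∧
                PySem.List.pyGetD nxt j 0 = 1 ∧ PySem.List.pyGetD nxt (j + 1) 0 = 1 then
              res + 1
            else res) res) 0 := by
  unfold check
  refine PySem.List.foldl_congr_mem _ _ _ _ ?_
  intro acc i _
  refine PySem.List.foldl_congr_mem _ _ _ _ ?_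
  intro res j _
  rcases pv01_cell hg i j with ha | ha <;>
    rcases pv01_cell hg i (j + 1) with hb | hb <;>
      rcases pv01_cell hg (i + 1) j with hc | hc <;>
        rcases pv01_cell hg (i + 1) (j + 1) with hd | hd <;>
          simp [ha, hb, hc, hd]

-- ===== VERDICT (by name: the statement is the Claim_ definition above) =====
theorem solution_spec : Claim_equal_solution := by
  unfold Claim_equal_solution Spec_solution
  intro n data _ _
  unfold solution solution_alt
  dsimp only
  have hstep : ∀ (m : List (List Int)) (i : List Int),
      (let start_row := PySem.List.pyGetD i 1 0
       let start_col := PySem.List.pyGetD i 0 0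
       let d := PySem.List.pyGetD i 2 0
       let g := PySem.List.pyGetD i 3 0
       let dir := PySem.List.pyGetD pvDirs d (0, 0)
       let q := [(start_row, start_col), (start_row + dir.1, start_col + dir.2)]
       DragonCurve q m g)
      = (let start_col := PySem.List.pyGetD i 0 0
         let start_row := PySem.List.pyGetD i 1 0
         let d := PySem.List.pyGetD i 2 0
         let g := PySem.List.pyGetD i 3 0
         let moves := (PySem.List.pyRange 0 g 1).foldl (fun ms _ => pvGrow ms)
           [PySem.List.pyGetD pvDirs d (0, 0)]
         (moves.foldl
           (fun st mv =>
             let p := (st.1.1 + mv.1, st.1.2 + mv.2)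
             (p, pvMark st.2 p))
           ((start_row, start_col), pvMark m (start_row, start_col))).2) := by
    intro m i
    show DragonCurve _ m _ = _
    unfold DragonCurve
    rw [show [((PySem.List.pyGetD i 1 0), (PySem.List.pyGetD i 0 0)),
          (PySem.List.pyGetD i 1 0 + (PySem.List.pyGetD pvDirs (PySem.List.pyGetD i 2 0) (0, 0)).1,
           PySem.List.pyGetD i 0 0 + (PySem.List.pyGetD pvDirs (PySem.List.pyGetD i 2 0) (0, 0)).2)]
        = pvPath ((PySem.List.pyGetD i 1 0), (PySem.List.pyGetD i 0 0))
            [PySem.List.pyGetD pvDirs (PySem.List.pyGetD i 2 0) (0, 0)] from rfl]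
    rw [foldl_rotate90, ← walk_mark]
  rw [PySem.List.foldl_congr_mem data _ _ _ (fun m i _ => hstep m i)]
  refine check_eq _ ?_
  refine pv01_foldl_step _ ?_ data _ pv01_init
  intro m i hm
  show pv01 ((((PySem.List.pyRange 0 (PySem.List.pyGetD i 3 0) 1).foldl (fun ms _ => pvGrow ms)
      [PySem.List.pyGetD pvDirs (PySem.List.pyGetD i 2 0) (0, 0)]).foldl
        (fun st mv =>
          let p := (st.1.1 + mv.1, st.1.2 + mv.2)
          (p, pvMark st.2 p))
        ((PySem.List.pyGetD i 1 0, PySem.List.pyGetD i 0 0),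
          pvMark m (PySem.List.pyGetD i 1 0, PySem.List.pyGetD i 0 0))).2)
  rw [walk_mark]
  exact pv01_foldl_mark hm _
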